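-- pv_equiv track=rewrite | github.com/cakelake1/Python-study | 1.3/1.3.1/1_task.py | white_walkers
-- ===== SOURCE A (Python) =====
-- def white_walkers(village):
--     cu_sum_prefix = [0] * (len(village) + 1)
--     list_digits = []
--     for i, char in enumerate(village):
--         cu_sum_prefix[i+1] = cu_sum_prefix[i] + (char == '=')
--         if char.isdigit():
--             list_digits.append((i, int(char)))
--     if len(list_digits) < 2:
--         return False
--     correct_pairs = []
--     for i in range(len(list_digits) - 1):
--         index_1, number_1 = list_digits[i]
--         index_2, number_2 = list_digits[i+1]
--         count = cu_sum_prefix[index_2] - cu_sum_prefix[index_1 + 1]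
--         if number_1 + number_2 == 10:
--             correct_pairs.append(count == 3)
--     return bool(correct_pairs) and all(correct_pairs)
-- ===== SOURCE B (Python) =====
-- def white_walkers(village):
--     prev = None
--     cnt = 0
--     found = False
--     ok = True
--     for char in village:
--         if char == '=':
--             cnt += 1
--         elif char.isdigit():
--             d = int(char)
--             if prev is not None and prev + d == 10:
--                 found = True
--                 if cnt != 3:
--                     ok = False
--             prev = d
--             cnt = 0
--     return found and ok
-- ===== Notes on version B (the rewrite author's own statement) =====
-- stated objective: simpler
-- what changed: Replaced A's prefix-sum array + digit-position list + second pairing loop by one streaming pass keeping only scalar state (previous digit, '='-counter since the last digit, found/ok flags).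
import Mathlib
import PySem

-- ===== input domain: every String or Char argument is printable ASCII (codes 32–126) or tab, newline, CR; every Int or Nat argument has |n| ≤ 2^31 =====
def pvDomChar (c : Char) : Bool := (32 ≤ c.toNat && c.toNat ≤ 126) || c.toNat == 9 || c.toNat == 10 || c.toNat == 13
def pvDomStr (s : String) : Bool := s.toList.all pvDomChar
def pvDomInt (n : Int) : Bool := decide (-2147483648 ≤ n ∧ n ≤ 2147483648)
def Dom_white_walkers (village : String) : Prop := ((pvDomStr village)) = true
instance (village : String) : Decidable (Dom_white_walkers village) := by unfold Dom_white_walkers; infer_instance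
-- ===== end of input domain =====

-- B replaces A's prefix-sum array + digit list + pairing loop by one streaming pass with scalar state (simpler, O(1) extra space); return value only, no mutation in either.

-- ===== PORT A =====
-- int(char); char is always a single ASCII digit here (guarded by isdigit on the ASCII domain), so int() succeeds
def wwDval (c : Char) : Int := (PySem.Int.ofChars? [c]).getD 0

-- 'number_1 + number_2 == 10' for the pair of consecutive digits at index i
def wwSum10 (ds : List (Int × Int)) (i : Int) : Bool :=
  decide ((PySem.List.pyGetD ds i (0, 0)).2 + (PySem.List.pyGetD ds (i + 1) (0, 0)).2 = 10)

-- 'count == 3' where count = cu_sum_prefix[index_2] - cu_sum_prefix[index_1 + 1] (indices always in range)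
def wwPair (pref : List Int) (ds : List (Int × Int)) (i : Int) : Bool :=
  decide (PySem.List.pyGetD pref (PySem.List.pyGetD ds (i + 1) (0, 0)).1 0
        - PySem.List.pyGetD pref ((PySem.List.pyGetD ds i (0, 0)).1 + 1) 0 = 3)

-- first loop: builds cu_sum_prefix left to right (carrying the cell cu_sum_prefix[i] it reads) and list_digits
def wwLoop1Step (st : List Int × Int × List (Int × Int)) (p : Int × Char) :
    List Int × Int × List (Int × Int) :=
  let next := st.2.1 + (if p.2 = '=' then 1 else 0)
  (st.1 ++ [next], next,
    if PySem.Chars.isdigit p.2 then st.2.2 ++ [(p.1, wwDval p.2)] else st.2.2)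

def white_walkers (village : String) : Bool :=
  let cs := village.toList
  let st := (PySem.List.enumerate cs).foldl wwLoop1Step ([0], 0, [])
  let pref := st.1
  let ds := st.2.2
  if ds.length < 2 then false
  else
    let pairs := (PySem.List.pyRange 0 (PySem.List.len ds - 1) 1).foldl
      (fun (acc : List Bool) (i : Int) =>
        if wwSum10 ds i then acc ++ [wwPair pref ds i] else acc) []
    !pairs.isEmpty && pairs.all id

-- ===== PORT B =====
-- state: (prev digit or none, '='-count since last digit, found flag, ok flag)
def wwStep (st : Option Int × Int × Bool × Bool) (c : Char) : Option Int × Int × Bool × Bool :=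
  if c = '=' then (st.1, st.2.1 + 1, st.2.2.1, st.2.2.2)
  else if PySem.Chars.isdigit c then
    let d := wwDval c
    match st.1 with
    | some p =>
      if p + d = 10 then (some d, 0, true, st.2.2.2 && decide (st.2.1 = 3))
      else (some d, 0, st.2.2.1, st.2.2.2)
    | none => (some d, 0, st.2.2.1, st.2.2.2)
  else st

def white_walkers_alt (village : String) : Bool :=
  let st := village.toList.foldl wwStep (none, 0, false, true)
  st.2.2.1 && st.2.2.2

-- ===== PRECONDITION & SPEC =====
def Spec_white_walkers (village : String) (out : Bool) : Prop := out = white_walkers_alt village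
instance (village : String) (out : Bool) : Decidable (Spec_white_walkers village out) := by unfold Spec_white_walkers; infer_instance

-- ===== CLAIM (what is proved, stated in full; the proofs are below) =====
def Claim_equal_white_walkers : Prop := ∀ (village : String), Dom_white_walkers village → Spec_white_walkers village (white_walkers village)

-- ===== LEMMAS AND PROOFS =====

-- common reference spec: the digit list, prefix '='-counts, and the two result flags
def wwInd (c : Char) : Int := if c = '=' then 1 else 0
def wwEqc (cs : List Char) : Int := cs.foldl (fun a c => a + wwInd c) 0
def wwP (cs : List Char) : List Int := (List.range (cs.length + 1)).map (fun j => wwEqc (cs.take j))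
def wwD (cs : List Char) : List (Int × Int) :=
  ((PySem.List.enumerate cs).filter (fun p => PySem.Chars.isdigit p.2)).map (fun p => (p.1, wwDval p.2))
def wwN (cs : List Char) : Nat := (wwD cs).length
def wwV (cs : List Char) (j : Nat) : Int := ((wwD cs).getD j (0, 0)).2
def wwPos (cs : List Char) (j : Nat) : Int := ((wwD cs).getD j (0, 0)).1
def wwC (cs : List Char) (j : Nat) : Int :=
  wwEqc (cs.take (wwPos cs (j + 1)).toNat) - wwEqc (cs.take ((wwPos cs j).toNat + 1))
def wwFoundS (cs : List Char) : Bool :=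
  (List.range (wwN cs - 1)).any (fun j => decide (wwV cs j + wwV cs (j + 1) = 10))
def wwOkS (cs : List Char) : Bool :=
  (List.range (wwN cs - 1)).all (fun j => !decide (wwV cs j + wwV cs (j + 1) = 10) || decide (wwC cs j = 3))
def wwLastS (cs : List Char) : Option Int := ((wwD cs).getLast?).map (·.2)
def wwOffS (cs : List Char) : Int :=
  match (wwD cs).getLast? with
  | none => 0
  | some p => wwEqc (cs.take (p.1.toNat + 1))
def wwCntS (cs : List Char) : Int := wwEqc cs - wwOffS cs

theorem wwEqc_append (cs : List Char) (c : Char) : wwEqc (cs ++ [c]) = wwEqc cs + wwInd c := by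
  simp [wwEqc]

theorem wwD_append (cs : List Char) (c : Char) :
    wwD (cs ++ [c]) = wwD cs ++ (if PySem.Chars.isdigit c then [((cs.length : Int), wwDval c)] else []) := by
  simp only [wwD, PySem.List.enumerate_append, List.filter_append, List.map_append]
  congr 1
  simp [PySem.List.enumerate_cons, PySem.List.enumerate_nil, List.filter]
  split <;> simp_all

theorem wwTake_append (cs : List Char) (c : Char) (j : Nat) (h : j ≤ cs.length) :
    (cs ++ [c]).take j = cs.take j := List.take_append_of_le_length h

theorem wwP_append (cs : List Char) (c : Char) :
    wwP (cs ++ [c]) = wwP cs ++ [wwEqc cs + wwInd c] := by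
  simp only [wwP, List.length_append, List.length_cons, List.length_nil]
  rw [show cs.length + 1 + 1 = (cs.length + 1) + 1 from rfl, List.range_succ, List.map_append]
  congr 1
  · apply List.map_congr_left
    intro j hj
    rw [List.mem_range] at hj
    rw [wwTake_append _ _ _ (by omega)]
  · simp only [List.map_cons, List.map_nil]
    rw [show cs.length + 1 = (cs ++ [c]).length by simp, List.take_length, wwEqc_append]

theorem ww_loop1 (cs : List Char) :
    (PySem.List.enumerate cs).foldl wwLoop1Step ([0], 0, []) = (wwP cs, wwEqc cs, wwD cs) := by
  induction cs using List.reverseRecOn with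
  | nil => simp [wwP, wwEqc, wwD, PySem.List.enumerate_nil]
  | append_singleton cs c ih =>
    rw [PySem.List.enumerate_append, List.foldl_append, ih]
    simp only [PySem.List.enumerate_cons, PySem.List.enumerate_nil, List.foldl_cons, List.foldl_nil]
    rw [wwP_append, wwEqc_append, wwD_append]
    simp only [wwLoop1Step, wwInd]
    split <;> (split <;> simp_all)

theorem wwPos_spec (cs : List Char) (j : Nat) (h : j < wwN cs) :
    ∃ k : Nat, wwPos cs j = (k : Int) ∧ k < cs.length := by
  have hlt : j < (wwD cs).length := h
  set y := (wwD cs).getD j (0, 0) with hy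
  have hmem : y ∈ wwD cs := by
    rw [hy, List.getD_eq_getElem _ _ hlt]
    exact List.getElem_mem hlt
  rw [wwD, List.mem_map] at hmem
  obtain ⟨p, hp, hpe⟩ := hmem
  rw [List.mem_filter] at hp
  obtain ⟨hp, _⟩ := hp
  rw [PySem.List.mem_enumerate_iff] at hp
  obtain ⟨k, hk, rfl⟩ := hp
  refine ⟨k, ?_, hk⟩
  have hps : wwPos cs j = y.1 := rfl
  rw [hps, ← hpe]
  simp

-- Bool list helpers
theorem list_any_congr {α : Type} {l : List α} {f g : α → Bool}
    (h : ∀ x ∈ l, f x = g x) : l.any f = l.any g := by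
  induction l with
  | nil => rfl
  | cons a t ih =>
    simp only [List.any_cons, h a (List.mem_cons_self ..),
      ih (fun x hx => h x (List.mem_cons_of_mem _ hx))]

theorem isEmpty_map' {α β : Type} (l : List α) (f : α → β) :
    (l.map f).isEmpty = l.isEmpty := by cases l <;> rfl

theorem all_map' {α β : Type} (l : List α) (f : α → β) (q : β → Bool) :
    (l.map f).all q = l.all (fun x => q (f x)) := by
  induction l with
  | nil => rfl
  | cons a t ih => simp only [List.map_cons, List.all_cons, ih]

theorem all_filter' {α : Type} (l : List α) (p q : α → Bool) :
    (l.filter p).all q = l.all (fun a => !p a || q a) := by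
  induction l with
  | nil => rfl
  | cons a t ih =>
    by_cases h : p a = true
    · simp [List.filter_cons, h, ih]
    · simp only [Bool.not_eq_true] at h
      simp [List.filter_cons, h, ih]

theorem any_pyRange_zero (n : Nat) (f : Int → Bool) :
    (PySem.List.pyRange 0 (n : Int) 1).any f = (List.range n).any (fun k => f (k : Int)) := by
  induction n with
  | zero =>
    rw [show ((0 : Nat) : Int) = 0 from rfl, PySem.List.pyRange_one_eq_nil (le_refl 0),
      List.range_zero]
    rfl
  | succ m ih =>
    rw [show ((m + 1 : Nat) : Int) = (m : Int) + 1 by push_cast; ring,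
      PySem.List.pyRange_one_succ_right (Int.natCast_nonneg m),
      List.range_succ, List.any_append, List.any_append, ih]
    simp

theorem all_pyRange_zero (n : Nat) (f : Int → Bool) :
    (PySem.List.pyRange 0 (n : Int) 1).all f = (List.range n).all (fun k => f (k : Int)) := by
  induction n with
  | zero =>
    rw [show ((0 : Nat) : Int) = 0 from rfl, PySem.List.pyRange_one_eq_nil (le_refl 0),
      List.range_zero]
    rfl
  | succ m ih =>
    rw [show ((m + 1 : Nat) : Int) = (m : Int) + 1 by push_cast; ring,
      PySem.List.pyRange_one_succ_right (Int.natCast_nonneg m),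
      List.range_succ, List.all_append, List.all_append, ih]
    simp

theorem list_all_congr {α : Type} {l : List α} {f g : α → Bool}
    (h : ∀ x ∈ l, f x = g x) : l.all f = l.all g := by
  induction l with
  | nil => rfl
  | cons a t ih =>
    simp only [List.all_cons, h a (List.mem_cons_self ..),
      ih (fun x hx => h x (List.mem_cons_of_mem _ hx))]

theorem filter_isEmpty_eq_not_any {α : Type} (l : List α) (p : α → Bool) :
    (l.filter p).isEmpty = !(l.any p) := by
  induction l with
  | nil => rfl
  | cons a t ih =>
    by_cases h : p a = true
    · simp [List.filter_cons, h]
    · simp only [Bool.not_eq_true] at h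
      simp [List.filter_cons, h, ih]

-- getD over append
theorem getD_append_left {α : Type} [Inhabited α] (l t : List α) (j : Nat) (d : α) (h : j < l.length) :
    (l ++ t).getD j d = l.getD j d := by
  rw [List.getD_eq_getElem?_getD, List.getD_eq_getElem?_getD, List.getElem?_append_left h]

theorem getD_append_self {α : Type} [Inhabited α] (l : List α) (x : α) (d : α) :
    (l ++ [x]).getD l.length d = x := by
  rw [List.getD_eq_getElem?_getD, List.getElem?_append_right (le_refl _)]
  simp

-- ===== characterization of A =====
theorem white_walkers_eq_spec (v : String) :
    white_walkers v = (wwFoundS v.toList && wwOkS v.toList) := by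
  simp only [white_walkers, ww_loop1]
  by_cases hn : (wwD v.toList).length < 2
  · rw [if_pos hn]
    have h0 : wwN v.toList - 1 = 0 := by unfold wwN; omega
    have hf : wwFoundS v.toList = false := by unfold wwFoundS; rw [h0]; rfl
    rw [hf, Bool.false_and]
  · rw [if_neg hn]
    rw [Nat.not_lt] at hn
    have hsum : ∀ j ∈ List.range (wwN v.toList - 1),
        wwSum10 (wwD v.toList) (j : Int) = decide (wwV v.toList j + wwV v.toList (j + 1) = 10) := by
      intro j hj
      unfold wwSum10 wwV
      rw [show ((j : Int) + 1) = ((j + 1 : Nat) : Int) by push_cast; ring,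
        PySem.List.pyGetD_natCast, PySem.List.pyGetD_natCast]
    have hpair : ∀ j ∈ List.range (wwN v.toList - 1),
        wwPair (wwP v.toList) (wwD v.toList) (j : Int) = decide (wwC v.toList j = 3) := by
      intro j hj
      rw [List.mem_range] at hj
      obtain ⟨k1, hk1, hk1lt⟩ := wwPos_spec v.toList j (by omega)
      obtain ⟨k2, hk2, hk2lt⟩ := wwPos_spec v.toList (j + 1) (by omega)
      have e2 : (PySem.List.pyGetD (wwD v.toList) ((j : Int) + 1) (0, 0)).1 = (k2 : Int) := by
        rw [show ((j : Int) + 1) = ((j + 1 : Nat) : Int) by push_cast; ring,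
          PySem.List.pyGetD_natCast]
        exact hk2
      have e1 : (PySem.List.pyGetD (wwD v.toList) (j : Int) (0, 0)).1 = (k1 : Int) := by
        rw [PySem.List.pyGetD_natCast]; exact hk1
      have p2 : PySem.List.pyGetD (wwP v.toList) (k2 : Int) 0 = wwEqc (v.toList.take k2) := by
        rw [PySem.List.pyGetD_natCast, wwP, List.getD_eq_getElem _ _ (by simp only [List.length_map, List.length_range]; omega)]
        simp
      have p1 : PySem.List.pyGetD (wwP v.toList) ((k1 : Int) + 1) 0
          = wwEqc (v.toList.take (k1 + 1)) := by
        rw [show ((k1 : Int) + 1) = ((k1 + 1 : Nat) : Int) by push_cast; ring,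
          PySem.List.pyGetD_natCast, wwP, List.getD_eq_getElem _ _ (by simp only [List.length_map, List.length_range]; omega)]
        simp
      simp only [wwPair, e1, e2, p1, p2, wwC]
      simp only [hk1, hk2, Int.toNat_natCast]
    have hlen : ((wwD v.toList).length : Int) - 1 = ((wwN v.toList - 1 : Nat) : Int) := by
      unfold wwN; omega
    rw [PySem.List.foldl_append_if (wwSum10 (wwD v.toList))
      (wwPair (wwP v.toList) (wwD v.toList))]
    simp only [List.nil_append, PySem.List.len_eq]
    rw [hlen, isEmpty_map', all_map', filter_isEmpty_eq_not_any, Bool.not_not,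
      all_filter', any_pyRange_zero, all_pyRange_zero]
    refine congrArg₂ (· && ·) ?_ ?_
    · unfold wwFoundS
      exact list_any_congr hsum
    · unfold wwOkS
      apply list_all_congr
      intro j hj
      rw [hsum j hj, hpair j hj]
      simp

-- nondigit step lemmas for B's invariant
theorem wwD_append_nondigit (cs : List Char) (c : Char) (hd : PySem.Chars.isdigit c = false) :
    wwD (cs ++ [c]) = wwD cs := by
  rw [wwD_append, hd]
  simp

theorem wwFoundS_nondigit (cs : List Char) (c : Char) (hd : PySem.Chars.isdigit c = false) :
    wwFoundS (cs ++ [c]) = wwFoundS cs := by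
  have hDeq := wwD_append_nondigit cs c hd
  simp [wwFoundS, wwN, wwV, hDeq]

theorem wwOkS_nondigit (cs : List Char) (c : Char) (hd : PySem.Chars.isdigit c = false) :
    wwOkS (cs ++ [c]) = wwOkS cs := by
  have hDeq := wwD_append_nondigit cs c hd
  unfold wwOkS
  have hN : wwN (cs ++ [c]) = wwN cs := by simp [wwN, hDeq]
  rw [hN]
  apply list_all_congr
  intro j hj
  rw [List.mem_range] at hj
  have hV : ∀ i, wwV (cs ++ [c]) i = wwV cs i := fun i => by simp [wwV, hDeq]
  have hC : wwC (cs ++ [c]) j = wwC cs j := by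
    obtain ⟨k1, hk1, hk1l⟩ := wwPos_spec cs j (by omega)
    obtain ⟨k2, hk2, hk2l⟩ := wwPos_spec cs (j + 1) (by omega)
    unfold wwC
    have hP : ∀ i, wwPos (cs ++ [c]) i = wwPos cs i := fun i => by simp [wwPos, hDeq]
    rw [hP, hP, hk1, hk2, Int.toNat_natCast, Int.toNat_natCast,
      wwTake_append _ _ _ (by omega), wwTake_append _ _ _ (by omega)]
  rw [hV, hV, hC]

theorem wwLastS_nondigit (cs : List Char) (c : Char) (hd : PySem.Chars.isdigit c = false) :
    wwLastS (cs ++ [c]) = wwLastS cs := by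
  simp [wwLastS, wwD_append_nondigit cs c hd]

theorem wwOffS_nondigit (cs : List Char) (c : Char) (hd : PySem.Chars.isdigit c = false) :
    wwOffS (cs ++ [c]) = wwOffS cs := by
  have hDeq := wwD_append_nondigit cs c hd
  unfold wwOffS
  rw [hDeq]
  cases hL : (wwD cs).getLast? with
  | none => rfl
  | some p =>
    show wwEqc ((cs ++ [c]).take (p.1.toNat + 1)) = wwEqc (cs.take (p.1.toNat + 1))
    have hne : wwD cs ≠ [] := by
      intro h0; rw [h0] at hL; simp at hL
    have hlenD : (wwD cs).length = wwN cs := rfl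
    have hn1 : 1 ≤ wwN cs := by
      have := List.length_pos_iff.mpr hne
      omega
    have h2 : (wwD cs).length - 1 < (wwD cs).length := by omega
    have hpe : p = (wwD cs).getD ((wwD cs).length - 1) (0, 0) := by
      rw [List.getD_eq_getElem _ _ h2]
      rw [List.getLast?_eq_getElem?, List.getElem?_eq_getElem h2] at hL
      exact (Option.some_inj.mp hL).symm
    obtain ⟨k, hk, hkl⟩ := wwPos_spec cs (wwN cs - 1) (by omega)
    have hp1 : p.1 = (k : Int) := by
      rw [hpe, show (wwD cs).length - 1 = wwN cs - 1 from by omega]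
      exact hk
    rw [hp1, Int.toNat_natCast, wwTake_append _ _ _ (by omega)]

theorem wwInd_of_ne (c : Char) (h : ¬ c = '=') : wwInd c = 0 := by
  simp [wwInd, h]

-- ===== characterization of B =====
theorem ww_B_inv (cs : List Char) :
    cs.foldl wwStep (none, 0, false, true) = (wwLastS cs, wwCntS cs, wwFoundS cs, wwOkS cs) := by
  induction cs using List.reverseRecOn with
  | nil => decide
  | append_singleton cs c ih =>
    rw [List.foldl_append, ih]
    simp only [List.foldl_cons, List.foldl_nil]
    by_cases hq : c = '='
    · subst hq
      have hd : PySem.Chars.isdigit '=' = false := by decide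
      rw [show wwStep (wwLastS cs, wwCntS cs, wwFoundS cs, wwOkS cs) '='
          = (wwLastS cs, wwCntS cs + 1, wwFoundS cs, wwOkS cs) by simp [wwStep]]
      rw [wwLastS_nondigit cs _ hd, wwFoundS_nondigit cs _ hd, wwOkS_nondigit cs _ hd]
      have hcnt : wwCntS (cs ++ ['=']) = wwCntS cs + 1 := by
        unfold wwCntS
        rw [wwEqc_append, wwOffS_nondigit cs _ hd]
        simp [wwInd]
        ring
      rw [hcnt]
    · by_cases hdig : PySem.Chars.isdigit c = true
      · -- digit case
        have hD := wwD_append cs c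
        rw [if_pos hdig] at hD
        have hlenD : (wwD cs).length = wwN cs := rfl
        have hE : wwEqc (cs ++ [c]) = wwEqc cs := by
          rw [wwEqc_append, wwInd_of_ne c hq]; ring
        have hlast : wwLastS (cs ++ [c]) = some (wwDval c) := by
          rw [wwLastS, hD]
          simp
        have hcnt : wwCntS (cs ++ [c]) = 0 := by
          unfold wwCntS wwOffS
          rw [hD]
          simp only [List.getLast?_concat]
          rw [Int.toNat_natCast, show cs.length + 1 = (cs ++ [c]).length by simp,
            List.take_length]
          exact sub_self _
        have hN : wwN (cs ++ [c]) = wwN cs + 1 := by simp [wwN, hD]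
        have hVlt : ∀ j, j < wwN cs → wwV (cs ++ [c]) j = wwV cs j := by
          intro j hj
          unfold wwV
          rw [hD, getD_append_left _ _ _ _ (by omega)]
        have hVlast : wwV (cs ++ [c]) (wwN cs) = wwDval c := by
          unfold wwV
          rw [hD, show wwN cs = (wwD cs).length from hlenD.symm, getD_append_self]
        cases hnz : wwN cs with
        | zero =>
          -- no previous digit
          have hDnil : wwD cs = [] := List.length_eq_zero_iff.mp hnz
          have hlastnone : wwLastS cs = none := by simp [wwLastS, hDnil]
          have hf0 : wwFoundS cs = false := by simp [wwFoundS, hnz]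
          have hk0 : wwOkS cs = true := by simp [wwOkS, hnz]
          rw [show wwStep (wwLastS cs, wwCntS cs, wwFoundS cs, wwOkS cs) c
              = (some (wwDval c), 0, wwFoundS cs, wwOkS cs) by
            simp [wwStep, hq, hdig, hlastnone]]
          have hf' : wwFoundS (cs ++ [c]) = false := by
            simp [wwFoundS, hN, hnz]
          have hk' : wwOkS (cs ++ [c]) = true := by
            simp [wwOkS, hN, hnz]
          rw [hlast, hcnt, hf', hk', hf0, hk0]
        | succ m =>
          -- previous digit exists: wwN cs = m + 1
          have hmlt : m < wwN cs := by omega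
          have hm : m < (wwD cs).length := by omega
          have hlastsome : wwLastS cs = some (wwV cs m) := by
            unfold wwLastS wwV
            have hlen2 : (wwD cs).length - 1 = m := by omega
            rw [List.getLast?_eq_getElem?, hlen2, List.getElem?_eq_getElem hm,
              List.getD_eq_getElem _ _ hm]
            rfl
          have hrange : List.range (wwN (cs ++ [c]) - 1) = List.range m ++ [m] := by
            rw [hN, hnz]
            simp [List.range_succ]
          have hVj : ∀ j ∈ List.range m, wwV (cs ++ [c]) j = wwV cs j := by
            intro j hj; rw [List.mem_range] at hj; exact hVlt j (by omega)
          have hVj1 : ∀ j ∈ List.range m, wwV (cs ++ [c]) (j + 1) = wwV cs (j + 1) := by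
            intro j hj; rw [List.mem_range] at hj; exact hVlt (j + 1) (by omega)
          have hCj : ∀ j ∈ List.range m, wwC (cs ++ [c]) j = wwC cs j := by
            intro j hj
            rw [List.mem_range] at hj
            obtain ⟨k1, hk1, hk1l⟩ := wwPos_spec cs j (by omega)
            obtain ⟨k2, hk2, hk2l⟩ := wwPos_spec cs (j + 1) (by omega)
            have hPj : wwPos (cs ++ [c]) j = wwPos cs j := by
              unfold wwPos; rw [hD, getD_append_left _ _ _ _ (by omega)]
            have hPj1 : wwPos (cs ++ [c]) (j + 1) = wwPos cs (j + 1) := by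
              unfold wwPos; rw [hD, getD_append_left _ _ _ _ (by omega)]
            unfold wwC
            rw [hPj, hPj1, hk1, hk2, Int.toNat_natCast, Int.toNat_natCast,
              wwTake_append _ _ _ (by omega), wwTake_append _ _ _ (by omega)]
          obtain ⟨k, hk, hkl⟩ := wwPos_spec cs m hmlt
          have hPlast : wwPos (cs ++ [c]) m = (k : Int) := by
            unfold wwPos
            rw [hD, getD_append_left _ _ _ _ (by omega)]
            exact hk
          have hPnew : wwPos (cs ++ [c]) (m + 1) = (cs.length : Int) := by
            unfold wwPos
            have hm1 : m + 1 = (wwD cs).length := by omega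
            rw [hD, hm1, getD_append_self]
          have hCnew : wwC (cs ++ [c]) m = wwCntS cs := by
            unfold wwC
            rw [hPnew, hPlast, Int.toNat_natCast, Int.toNat_natCast,
              show List.take cs.length (cs ++ [c]) = cs from by
                rw [wwTake_append _ _ _ (le_refl _), List.take_length],
              wwTake_append _ _ _ (by omega)]
            unfold wwCntS wwOffS
            have h2 : (wwD cs).length - 1 < (wwD cs).length := by omega
            have hpe : (wwD cs).getLast? = some ((wwD cs).getD m (0, 0)) := by
              rw [List.getLast?_eq_getElem?,
                show (wwD cs).length - 1 = m from by omega,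
                List.getElem?_eq_getElem hm, List.getD_eq_getElem _ _ hm]
            rw [hpe]
            show wwEqc cs - wwEqc (List.take (k + 1) cs)
              = wwEqc cs - wwEqc (cs.take (((wwD cs).getD m (0, 0)).1.toNat + 1))
            rw [show ((wwD cs).getD m (0, 0)).1 = (k : Int) from hk, Int.toNat_natCast]
          have hf' : wwFoundS (cs ++ [c])
              = (wwFoundS cs || decide (wwV cs m + wwDval c = 10)) := by
            unfold wwFoundS
            rw [hrange, List.any_append]
            have h1 : (List.range m).any
                  (fun j => decide (wwV (cs ++ [c]) j + wwV (cs ++ [c]) (j + 1) = 10))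
                = (List.range (wwN cs - 1)).any
                  (fun j => decide (wwV cs j + wwV cs (j + 1) = 10)) := by
              rw [show wwN cs - 1 = m from by omega]
              apply list_any_congr
              intro j hj
              rw [hVj j hj, hVj1 j hj]
            rw [h1]
            simp only [List.any_cons, List.any_nil, Bool.or_false]
            rw [hVlt m hmlt, show m + 1 = wwN cs from hnz.symm, hVlast]
          have hk' : wwOkS (cs ++ [c])
              = (wwOkS cs && (!decide (wwV cs m + wwDval c = 10) || decide (wwCntS cs = 3))) := by
            unfold wwOkS
            rw [hrange, List.all_append]
            have h1 : (List.range m).all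
                  (fun j => !decide (wwV (cs ++ [c]) j + wwV (cs ++ [c]) (j + 1) = 10)
                    || decide (wwC (cs ++ [c]) j = 3))
                = (List.range (wwN cs - 1)).all
                  (fun j => !decide (wwV cs j + wwV cs (j + 1) = 10) || decide (wwC cs j = 3)) := by
              rw [show wwN cs - 1 = m from by omega]
              apply list_all_congr
              intro j hj
              rw [hVj j hj, hVj1 j hj, hCj j hj]
            rw [h1]
            simp only [List.all_cons, List.all_nil, Bool.and_true]
            rw [hVlt m hmlt, show m + 1 = wwN cs from hnz.symm, hVlast, hCnew]
          rw [show wwStep (wwLastS cs, wwCntS cs, wwFoundS cs, wwOkS cs) c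
              = (if wwV cs m + wwDval c = 10
                 then (some (wwDval c), 0, true, wwOkS cs && decide (wwCntS cs = 3))
                 else (some (wwDval c), 0, wwFoundS cs, wwOkS cs)) by
            simp only [wwStep, if_neg hq, if_pos hdig, hlastsome]]
          rw [hlast, hcnt, hf', hk']
          by_cases hsum : wwV cs m + wwDval c = 10
          · rw [if_pos hsum]
            simp [hsum]
          · rw [if_neg hsum]
            simp [hsum]
      · -- plain character
        simp only [Bool.not_eq_true] at hdig
        rw [show wwStep (wwLastS cs, wwCntS cs, wwFoundS cs, wwOkS cs) c
            = (wwLastS cs, wwCntS cs, wwFoundS cs, wwOkS cs) by simp [wwStep, hq, hdig]]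
        rw [wwLastS_nondigit cs _ hdig, wwFoundS_nondigit cs _ hdig, wwOkS_nondigit cs _ hdig]
        have hcnt : wwCntS (cs ++ [c]) = wwCntS cs := by
          unfold wwCntS
          rw [wwEqc_append, wwOffS_nondigit cs _ hdig, wwInd_of_ne c hq]
          ring
        rw [hcnt]

theorem white_walkers_alt_eq_spec (v : String) :
    white_walkers_alt v = (wwFoundS v.toList && wwOkS v.toList) := by
  show ((v.toList.foldl wwStep (none, 0, false, true)).2.2.1
      && (v.toList.foldl wwStep (none, 0, false, true)).2.2.2)
    = (wwFoundS v.toList && wwOkS v.toList)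
  rw [ww_B_inv]

-- ===== VERDICT (by name: the statement is the Claim_ definition above) =====
theorem white_walkers_spec : Claim_equal_white_walkers := by
  unfold Claim_equal_white_walkers
  intro village _
  unfold Spec_white_walkers
  rw [white_walkers_eq_spec, white_walkers_alt_eq_spec]
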